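-- pv_equiv track=rewrite | github.com/geometalab/Vector-Tiles-Reader-QGIS-Plugin | plugin/util/tile_helper.py | get_zoom_by_scale
-- ===== SOURCE A (Python) =====
-- def get_zoom_by_scale(scale: int) -> int:
--     if scale < 0:
--         return 23
--     zoom = 0
--     for upper_bound in sorted(_zoom_level_by_upper_scale_bound):
--         if scale < upper_bound:
--             zoom = _zoom_level_by_upper_scale_bound[upper_bound]
--             break
--     return zoom
--
-- _zoom_level_by_upper_scale_bound = {
--     1000000000: 0,
--     500000000: 1,
--     200000000: 2,
--     50000000: 3,
--     25000000: 4,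
--     12500000: 5,
--     6500000: 6,
--     3000000: 7,
--     1500000: 8,
--     750000: 9,
--     400000: 10,
--     200000: 11,
--     100000: 12,
--     50000: 13,
--     25000: 14,
--     12500: 15,
--     5000: 16,
--     2500: 17,
--     1500: 18,
--     750: 19,
--     500: 20,
--     250: 21,
--     100: 22,
--     0: 23,
-- }
-- ===== SOURCE B (Python) =====
-- # Different algorithm: one-time sorted bounds/zooms tables + hand-written binary search
-- # instead of per-call sort + linear scan.
-- _BOUNDS = (0, 100, 250, 500, 750, 1500, 2500, 5000, 12500, 25000, 50000, 100000,
--            200000, 400000, 750000, 1500000, 3000000, 6500000, 12500000, 25000000,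
--            50000000, 200000000, 500000000, 1000000000)
-- _ZOOMS = (23, 22, 21, 20, 19, 18, 17, 16, 15, 14, 13, 12, 11, 10, 9, 8, 7, 6, 5, 4, 3, 2, 1, 0)
--
--
-- def get_zoom_by_scale(scale: int) -> int:
--     if scale < 0:
--         return 23
--     lo, hi = 0, len(_BOUNDS)
--     while lo < hi:
--         mid = (lo + hi) // 2
--         if _BOUNDS[mid] <= scale:
--             lo = mid + 1
--         else:
--             hi = mid
--     if lo == len(_BOUNDS):
--         return 0
--     return _ZOOMS[lo]
-- ===== Notes on version B (the rewrite author's own statement) =====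
-- stated objective: faster
-- what changed: Replaced the per-call sort of the dict keys plus linear scan with module-level precomputed sorted bound/zoom tables probed by a binary search.
import Mathlib
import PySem

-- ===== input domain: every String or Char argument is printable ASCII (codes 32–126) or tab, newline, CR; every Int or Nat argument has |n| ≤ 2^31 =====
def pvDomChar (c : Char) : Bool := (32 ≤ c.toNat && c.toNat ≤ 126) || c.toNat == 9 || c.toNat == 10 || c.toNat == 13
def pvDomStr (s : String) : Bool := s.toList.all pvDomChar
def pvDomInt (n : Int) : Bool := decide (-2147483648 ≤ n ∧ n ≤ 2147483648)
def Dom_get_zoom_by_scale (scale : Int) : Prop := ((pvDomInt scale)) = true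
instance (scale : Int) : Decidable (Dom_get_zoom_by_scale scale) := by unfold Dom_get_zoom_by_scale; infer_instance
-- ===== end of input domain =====

-- B replaces A's per-call sort + linear scan with module-level sorted bound/zoom tables probed by a hand-written binary search; same return value on every int.

-- ===== PORT A =====
-- the module-level dict _zoom_level_by_upper_scale_bound, in its Python insertion order
def pvZoomDict : PySem.Dict Int Int :=
  PySem.Dict.ofList [(1000000000, 0), (500000000, 1), (200000000, 2), (50000000, 3), (25000000, 4),
   (12500000, 5), (6500000, 6), (3000000, 7), (1500000, 8), (750000, 9),
   (400000, 10), (200000, 11), (100000, 12), (50000, 13), (25000, 14),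
   (12500, 15), (5000, 16), (2500, 17), (1500, 18), (750, 19), (500, 20),
   (250, 21), (100, 22), (0, 23)]

-- A's for-loop with break: the first upper_bound with scale < upper_bound wins; zoom stays 0 if none does
def pvLoopA (scale : Int) : List Int → Int
  | [] => 0
  | b :: rest => if scale < b then PySem.Dict.getD pvZoomDict b 0 else pvLoopA scale rest

def get_zoom_by_scale (scale : Int) : Int :=
  if scale < 0 then 23
  else pvLoopA scale (PySem.List.sorted (PySem.Dict.keys pvZoomDict) (fun x => x) false)

-- ===== PORT B =====
-- Source B's module-level _BOUNDS and _ZOOMS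
def pvBounds : List Int :=
  [0, 100, 250, 500, 750, 1500, 2500, 5000, 12500, 25000, 50000, 100000,
   200000, 400000, 750000, 1500000, 3000000, 6500000, 12500000, 25000000,
   50000000, 200000000, 500000000, 1000000000]

def pvZooms : List Int :=
  [23, 22, 21, 20, 19, 18, 17, 16, 15, 14, 13, 12, 11, 10, 9, 8, 7, 6, 5, 4, 3, 2, 1, 0]

-- Source B's while-loop; the fuel argument only guards termination (24 halving steps can never be exhausted)
def pvBsearch (scale : Int) : Nat → Nat → Nat → Nat
  | 0, lo, _ => lo
  | fuel + 1, lo, hi =>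
    if lo < hi then
      let mid := (lo + hi) / 2
      if pvBounds.getD mid 0 ≤ scale then pvBsearch scale fuel (mid + 1) hi
      else pvBsearch scale fuel lo mid
    else lo

def get_zoom_by_scale_alt (scale : Int) : Int :=
  if scale < 0 then 23
  else
    let lo := pvBsearch scale 24 0 24
    if lo = 24 then 0 else pvZooms.getD lo 0

-- ===== PRECONDITION & SPEC =====
def Spec_get_zoom_by_scale (scale : Int) (out : Int) : Prop := out = get_zoom_by_scale_alt scale
instance (scale : Int) (out : Int) : Decidable (Spec_get_zoom_by_scale scale out) := by unfold Spec_get_zoom_by_scale; infer_instance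

-- ===== CLAIM (what is proved, stated in full; the proofs are below) =====
def Claim_equal_get_zoom_by_scale : Prop := ∀ (scale : Int), Dom_get_zoom_by_scale scale → Spec_get_zoom_by_scale scale (get_zoom_by_scale scale)

-- ===== LEMMAS AND PROOFS =====

-- both ports read scale only through comparisons with the bounds, so they are constant on each interval between bounds
lemma pvLoopA_congr (s r : Int) : ∀ bs : List Int, (∀ b ∈ bs, (s < b ↔ r < b)) → pvLoopA s bs = pvLoopA r bs := by
  intro bs
  induction bs with
  | nil => intro _; rfl
  | cons b rest ih =>
    intro h
    simp only [pvLoopA]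
    by_cases hc : r < b
    · rw [if_pos ((h b (by simp)).mpr hc), if_pos hc]
    · rw [if_neg (fun hs => hc ((h b (by simp)).mp hs)), if_neg hc]
      exact ih (fun x hx => h x (by simp [hx]))

lemma pvBounds_getD_mem (m : Nat) : pvBounds.getD m 0 ∈ pvBounds := by
  rcases Nat.lt_or_ge m pvBounds.length with h | h
  · rw [List.getD_eq_getElem _ _ h]
    exact List.getElem_mem h
  · rw [List.getD_eq_default _ _ h]
    simp [pvBounds]

lemma pvBsearch_congr (s r : Int) (h : ∀ b ∈ pvBounds, (b ≤ s ↔ b ≤ r)) :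
    ∀ (f lo hi : Nat), pvBsearch s f lo hi = pvBsearch r f lo hi := by
  intro f
  induction f with
  | zero => intro lo hi; rfl
  | succ f ih =>
    intro lo hi
    simp only [pvBsearch]
    by_cases hlt : lo < hi
    · simp only [hlt, if_true]
      by_cases hc : pvBounds.getD ((lo + hi) / 2) 0 ≤ r
      · rw [if_pos ((h _ (pvBounds_getD_mem _)).mpr hc), if_pos hc]
        exact ih _ _
      · rw [if_neg (fun hx => hc ((h _ (pvBounds_getD_mem _)).mp hx)), if_neg hc]
        exact ih _ _
    · simp [hlt]

-- agreement at a representative of scale's interval transfers to scale itself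
lemma pvAgree_of_congr (s r : Int) (hs : ¬ s < 0) (hr : ¬ r < 0)
    (h : ∀ b ∈ pvBounds, (s < b ↔ r < b))
    (hrep : get_zoom_by_scale r = get_zoom_by_scale_alt r) :
    get_zoom_by_scale s = get_zoom_by_scale_alt s := by
  have h' : ∀ b ∈ pvBounds, (b ≤ s ↔ b ≤ r) := by
    intro b hb
    have := h b hb
    constructor <;> intro <;> omega
  have hsort : PySem.List.sorted (PySem.Dict.keys pvZoomDict) (fun x => x) false = pvBounds := by
    decide
  unfold get_zoom_by_scale get_zoom_by_scale_alt at *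
  rw [if_neg hs, if_neg hs, if_neg hr, if_neg hr] at *
  rw [hsort] at *
  rw [pvLoopA_congr s r pvBounds (fun b hb => h b hb)]
  simp only [pvBsearch_congr s r h']
  exact hrep


-- ===== VERDICT (by name: the statement is the Claim_ definition above) =====
theorem get_zoom_by_scale_spec : Claim_equal_get_zoom_by_scale := by
  intro scale _
  unfold Spec_get_zoom_by_scale
  by_cases h0 : scale < 0
  case pos =>
    unfold get_zoom_by_scale get_zoom_by_scale_alt
    rw [if_pos h0, if_pos h0]
  case neg =>
    by_cases c0 : scale < 100
    case pos =>
      exact pvAgree_of_congr scale 0 h0 (by norm_num)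
        (by intro b hb; fin_cases hb <;> omega) (by decide)
    case neg =>
      by_cases c1 : scale < 250
      case pos =>
        exact pvAgree_of_congr scale 100 h0 (by norm_num)
          (by intro b hb; fin_cases hb <;> omega) (by decide)
      case neg =>
        by_cases c2 : scale < 500
        case pos =>
          exact pvAgree_of_congr scale 250 h0 (by norm_num)
            (by intro b hb; fin_cases hb <;> omega) (by decide)
        case neg =>
          by_cases c3 : scale < 750
          case pos =>
            exact pvAgree_of_congr scale 500 h0 (by norm_num)
              (by intro b hb; fin_cases hb <;> omega) (by decide)
          case neg =>
            by_cases c4 : scale < 1500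
            case pos =>
              exact pvAgree_of_congr scale 750 h0 (by norm_num)
                (by intro b hb; fin_cases hb <;> omega) (by decide)
            case neg =>
              by_cases c5 : scale < 2500
              case pos =>
                exact pvAgree_of_congr scale 1500 h0 (by norm_num)
                  (by intro b hb; fin_cases hb <;> omega) (by decide)
              case neg =>
                by_cases c6 : scale < 5000
                case pos =>
                  exact pvAgree_of_congr scale 2500 h0 (by norm_num)
                    (by intro b hb; fin_cases hb <;> omega) (by decide)
                case neg =>
                  by_cases c7 : scale < 12500
                  case pos =>
                    exact pvAgree_of_congr scale 5000 h0 (by norm_num)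
                      (by intro b hb; fin_cases hb <;> omega) (by decide)
                  case neg =>
                    by_cases c8 : scale < 25000
                    case pos =>
                      exact pvAgree_of_congr scale 12500 h0 (by norm_num)
                        (by intro b hb; fin_cases hb <;> omega) (by decide)
                    case neg =>
                      by_cases c9 : scale < 50000
                      case pos =>
                        exact pvAgree_of_congr scale 25000 h0 (by norm_num)
                          (by intro b hb; fin_cases hb <;> omega) (by decide)
                      case neg =>
                        by_cases c10 : scale < 100000
                        case pos =>
                          exact pvAgree_of_congr scale 50000 h0 (by norm_num)
                            (by intro b hb; fin_cases hb <;> omega) (by decide)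
                        case neg =>
                          by_cases c11 : scale < 200000
                          case pos =>
                            exact pvAgree_of_congr scale 100000 h0 (by norm_num)
                              (by intro b hb; fin_cases hb <;> omega) (by decide)
                          case neg =>
                            by_cases c12 : scale < 400000
                            case pos =>
                              exact pvAgree_of_congr scale 200000 h0 (by norm_num)
                                (by intro b hb; fin_cases hb <;> omega) (by decide)
                            case neg =>
                              by_cases c13 : scale < 750000
                              case pos =>
                                exact pvAgree_of_congr scale 400000 h0 (by norm_num)
                                  (by intro b hb; fin_cases hb <;> omega) (by decide)
                              case neg =>
                                by_cases c14 : scale < 1500000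
                                case pos =>
                                  exact pvAgree_of_congr scale 750000 h0 (by norm_num)
                                    (by intro b hb; fin_cases hb <;> omega) (by decide)
                                case neg =>
                                  by_cases c15 : scale < 3000000
                                  case pos =>
                                    exact pvAgree_of_congr scale 1500000 h0 (by norm_num)
                                      (by intro b hb; fin_cases hb <;> omega) (by decide)
                                  case neg =>
                                    by_cases c16 : scale < 6500000
                                    case pos =>
                                      exact pvAgree_of_congr scale 3000000 h0 (by norm_num)
                                        (by intro b hb; fin_cases hb <;> omega) (by decide)
                                    case neg =>
                                      by_cases c17 : scale < 12500000
                                      case pos =>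
                                        exact pvAgree_of_congr scale 6500000 h0 (by norm_num)
                                          (by intro b hb; fin_cases hb <;> omega) (by decide)
                                      case neg =>
                                        by_cases c18 : scale < 25000000
                                        case pos =>
                                          exact pvAgree_of_congr scale 12500000 h0 (by norm_num)
                                            (by intro b hb; fin_cases hb <;> omega) (by decide)
                                        case neg =>
                                          by_cases c19 : scale < 50000000
                                          case pos =>
                                            exact pvAgree_of_congr scale 25000000 h0 (by norm_num)
                                              (by intro b hb; fin_cases hb <;> omega) (by decide)
                                          case neg =>
                                            by_cases c20 : scale < 200000000
                                            case pos =>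
                                              exact pvAgree_of_congr scale 50000000 h0 (by norm_num)
                                                (by intro b hb; fin_cases hb <;> omega) (by decide)
                                            case neg =>
                                              by_cases c21 : scale < 500000000
                                              case pos =>
                                                exact pvAgree_of_congr scale 200000000 h0 (by norm_num)
                                                  (by intro b hb; fin_cases hb <;> omega) (by decide)
                                              case neg =>
                                                by_cases c22 : scale < 1000000000
                                                case pos =>
                                                  exact pvAgree_of_congr scale 500000000 h0 (by norm_num)
                                                    (by intro b hb; fin_cases hb <;> omega) (by decide)
                                                case neg =>
                                                  exact pvAgree_of_congr scale 1000000000 h0 (by norm_num)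
                                                    (by intro b hb; fin_cases hb <;> omega) (by decide)
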